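-- pv_equiv track=rewrite | github.com/robencr8/mashaaer-core | test_rule_based_emotions.py | are_emotions_equivalent
-- ===== SOURCE A (Python) =====
-- def are_emotions_equivalent(emotion1, emotion2):
--     """Check if two emotions are semantically equivalent"""
--     # Define groups of equivalent emotions
--     equivalent_groups = [
--         {"happy", "excited", "joy", "joyful"},
--         {"sad", "disappointed", "melancholy"},
--         {"fearful", "scared", "afraid", "anxious", "nervous"},
--         {"angry", "frustrated", "mad", "annoyed"},
--         {"surprised", "shocked", "astonished", "amazed"},
--         {"disgusted", "repulsed"},
--         {"calm", "relaxed", "peaceful", "serene"},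
--         {"proud", "accomplished", "confident"},
--         {"grateful", "thankful", "appreciative"},
--         {"inspired", "motivated", "determined", "hopeful"},
--         {"confused", "uncertain", "unsure", "puzzled"},
--         {"embarrassed", "humiliated", "ashamed"},
--         {"bored", "disinterested", "uninterested"},
--         {"tired", "exhausted", "fatigued"},
--         {"satisfied", "content", "fulfilled"},
--         {"lonely", "isolated", "abandoned"}
--     ]
--
--     # Check if emotions are in the same group
--     for group in equivalent_groups:
--         if emotion1 in group and emotion2 in group:
--             return True
--
--     # Also check exact match
--     return emotion1 == emotion2
-- ===== SOURCE B (Python) =====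
-- # Flat literal word -> group-id table; each call is two lookups with distinct miss defaults.
-- _GROUP_ID = {
--     "happy": 0, "excited": 0, "joy": 0, "joyful": 0,
--     "sad": 1, "disappointed": 1, "melancholy": 1,
--     "fearful": 2, "scared": 2, "afraid": 2, "anxious": 2, "nervous": 2,
--     "angry": 3, "frustrated": 3, "mad": 3, "annoyed": 3,
--     "surprised": 4, "shocked": 4, "astonished": 4, "amazed": 4,
--     "disgusted": 5, "repulsed": 5,
--     "calm": 6, "relaxed": 6, "peaceful": 6, "serene": 6,
--     "proud": 7, "accomplished": 7, "confident": 7,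
--     "grateful": 8, "thankful": 8, "appreciative": 8,
--     "inspired": 9, "motivated": 9, "determined": 9, "hopeful": 9,
--     "confused": 10, "uncertain": 10, "unsure": 10, "puzzled": 10,
--     "embarrassed": 11, "humiliated": 11, "ashamed": 11,
--     "bored": 12, "disinterested": 12, "uninterested": 12,
--     "tired": 13, "exhausted": 13, "fatigued": 13,
--     "satisfied": 14, "content": 14, "fulfilled": 14,
--     "lonely": 15, "isolated": 15, "abandoned": 15,
-- }
--
--
-- def are_emotions_equivalent(emotion1, emotion2):
--     """Check if two emotions are semantically equivalent"""
--     return _GROUP_ID.get(emotion1, -1) == _GROUP_ID.get(emotion2, -2) or emotion1 == emotion2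
-- ===== Notes on version B (the rewrite author's own statement) =====
-- stated objective: idiomatic
-- what changed: B replaces A's per-call scan over 16 set literals with a flat literal word->group-id dict and a single expression of two .get lookups (with distinct miss defaults) compared, falling back via 'or' to string equality.
import Mathlib
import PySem

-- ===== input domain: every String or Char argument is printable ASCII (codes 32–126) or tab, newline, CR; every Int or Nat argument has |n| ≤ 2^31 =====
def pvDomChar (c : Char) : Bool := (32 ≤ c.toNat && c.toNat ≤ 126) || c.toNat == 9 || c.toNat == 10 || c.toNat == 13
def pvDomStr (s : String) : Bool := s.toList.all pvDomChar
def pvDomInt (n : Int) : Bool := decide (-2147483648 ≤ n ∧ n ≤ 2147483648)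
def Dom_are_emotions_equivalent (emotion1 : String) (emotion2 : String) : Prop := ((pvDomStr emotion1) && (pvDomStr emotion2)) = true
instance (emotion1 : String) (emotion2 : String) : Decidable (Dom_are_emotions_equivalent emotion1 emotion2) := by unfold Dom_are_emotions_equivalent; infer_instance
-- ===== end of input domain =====

-- B answers with two lookups (with distinct miss defaults) in a flat literal word -> group-id table instead of A's per-call scan over 16 set literals (idiomatic index-first reshaping; return value proved equal everywhere).


-- ===== PORT A =====
-- the 16 set literals of A, in order
def pvGroupsA : List (PySem.Set String) :=
  [ PySem.Set.ofList ["happy", "excited", "joy", "joyful"],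
    PySem.Set.ofList ["sad", "disappointed", "melancholy"],
    PySem.Set.ofList ["fearful", "scared", "afraid", "anxious", "nervous"],
    PySem.Set.ofList ["angry", "frustrated", "mad", "annoyed"],
    PySem.Set.ofList ["surprised", "shocked", "astonished", "amazed"],
    PySem.Set.ofList ["disgusted", "repulsed"],
    PySem.Set.ofList ["calm", "relaxed", "peaceful", "serene"],
    PySem.Set.ofList ["proud", "accomplished", "confident"],
    PySem.Set.ofList ["grateful", "thankful", "appreciative"],
    PySem.Set.ofList ["inspired", "motivated", "determined", "hopeful"],
    PySem.Set.ofList ["confused", "uncertain", "unsure", "puzzled"],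
    PySem.Set.ofList ["embarrassed", "humiliated", "ashamed"],
    PySem.Set.ofList ["bored", "disinterested", "uninterested"],
    PySem.Set.ofList ["tired", "exhausted", "fatigued"],
    PySem.Set.ofList ["satisfied", "content", "fulfilled"],
    PySem.Set.ofList ["lonely", "isolated", "abandoned"] ]

-- 'for group in equivalent_groups: if emotion1 in group and emotion2 in group: return True' then 'return emotion1 == emotion2'
def pvLoopA (emotion1 : String) (emotion2 : String) : List (PySem.Set String) → Bool
  | [] => emotion1 == emotion2
  | g :: rest =>
      if PySem.Set.contains g emotion1 && PySem.Set.contains g emotion2 then true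
      else pvLoopA emotion1 emotion2 rest

def are_emotions_equivalent (emotion1 : String) (emotion2 : String) : Bool :=
  pvLoopA emotion1 emotion2 pvGroupsA

-- ===== PORT B =====
-- _GROUP_ID: the flat literal dict of Source B, word -> group id
def pvGroupId : PySem.Dict String Int :=
  PySem.Dict.ofList [
    ("happy", 0), ("excited", 0), ("joy", 0), ("joyful", 0),
    ("sad", 1), ("disappointed", 1), ("melancholy", 1),
    ("fearful", 2), ("scared", 2), ("afraid", 2), ("anxious", 2), ("nervous", 2),
    ("angry", 3), ("frustrated", 3), ("mad", 3), ("annoyed", 3),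
    ("surprised", 4), ("shocked", 4), ("astonished", 4), ("amazed", 4),
    ("disgusted", 5), ("repulsed", 5),
    ("calm", 6), ("relaxed", 6), ("peaceful", 6), ("serene", 6),
    ("proud", 7), ("accomplished", 7), ("confident", 7),
    ("grateful", 8), ("thankful", 8), ("appreciative", 8),
    ("inspired", 9), ("motivated", 9), ("determined", 9), ("hopeful", 9),
    ("confused", 10), ("uncertain", 10), ("unsure", 10), ("puzzled", 10),
    ("embarrassed", 11), ("humiliated", 11), ("ashamed", 11),
    ("bored", 12), ("disinterested", 12), ("uninterested", 12),
    ("tired", 13), ("exhausted", 13), ("fatigued", 13),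
    ("satisfied", 14), ("content", 14), ("fulfilled", 14),
    ("lonely", 15), ("isolated", 15), ("abandoned", 15) ]

def are_emotions_equivalent_alt (emotion1 : String) (emotion2 : String) : Bool :=
  (pvGroupId.getD emotion1 (-1) == pvGroupId.getD emotion2 (-2)) || emotion1 == emotion2

-- ===== PRECONDITION & SPEC =====
def Spec_are_emotions_equivalent (emotion1 : String) (emotion2 : String) (out : Bool) : Prop := out = are_emotions_equivalent_alt emotion1 emotion2
instance (emotion1 : String) (emotion2 : String) (out : Bool) : Decidable (Spec_are_emotions_equivalent emotion1 emotion2 out) := by unfold Spec_are_emotions_equivalent; infer_instance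

-- ===== CLAIM (what is proved, stated in full; the proofs are below) =====
def Claim_equal_are_emotions_equivalent : Prop := ∀ (emotion1 : String) (emotion2 : String), Dom_are_emotions_equivalent emotion1 emotion2 → Spec_are_emotions_equivalent emotion1 emotion2 (are_emotions_equivalent emotion1 emotion2)

-- ===== LEMMAS AND PROOFS =====

-- A's groups as plain word lists (proof-side helper)
def pvGroupLists : List (List String) :=
  [ ["happy", "excited", "joy", "joyful"],
    ["sad", "disappointed", "melancholy"],
    ["fearful", "scared", "afraid", "anxious", "nervous"],
    ["angry", "frustrated", "mad", "annoyed"],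
    ["surprised", "shocked", "astonished", "amazed"],
    ["disgusted", "repulsed"],
    ["calm", "relaxed", "peaceful", "serene"],
    ["proud", "accomplished", "confident"],
    ["grateful", "thankful", "appreciative"],
    ["inspired", "motivated", "determined", "hopeful"],
    ["confused", "uncertain", "unsure", "puzzled"],
    ["embarrassed", "humiliated", "ashamed"],
    ["bored", "disinterested", "uninterested"],
    ["tired", "exhausted", "fatigued"],
    ["satisfied", "content", "fulfilled"],
    ["lonely", "isolated", "abandoned"] ]

-- first-match classification: the index (counting from s) of the first group containing e
def pvIdx? : List (List String) → Int → String → Option Int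
  | [], _, _ => none
  | g :: rest, s, e => if e ∈ g then some s else pvIdx? rest (s + 1) e

theorem pvIdx?_none_of_not_mem (gs : List (List String)) (s : Int) (e : String)
    (h : e ∉ gs.flatten) : pvIdx? gs s e = none := by
  induction gs generalizing s with
  | nil => rfl
  | cons g rest ih =>
    simp only [List.flatten_cons, List.mem_append, not_or] at h
    simp only [pvIdx?, if_neg h.1]
    exact ih (s + 1) h.2

theorem pvIdx?_ge (gs : List (List String)) (s : Int) (e : String) (i : Int)
    (h : pvIdx? gs s e = some i) : s ≤ i := by
  induction gs generalizing s with
  | nil => simp [pvIdx?] at h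
  | cons g rest ih =>
    simp only [pvIdx?] at h
    split at h
    · simp only [Option.some.injEq] at h; omega
    · have := ih (s + 1) h; omega

theorem pvGroupFold_get? (ws : List String) (i : Int) (d : PySem.Dict String Int) (e : String) :
    (ws.foldl (fun d w => d.insert w i) d).get? e = if e ∈ ws then some i else d.get? e := by
  induction ws generalizing d with
  | nil => simp
  | cons w rest ih =>
    simp only [List.foldl_cons, ih, PySem.Dict.get?_insert, List.mem_cons]
    by_cases h1 : e ∈ rest <;> by_cases h2 : e = w <;> simp [h1, h2]

theorem pvDictFold_get? (gs : List (List String)) (s : Int) (d : PySem.Dict String Int)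
    (e : String) (hnd : gs.flatten.Nodup) :
    ((PySem.List.enumerate gs s).foldl
        (fun d p => p.2.foldl (fun d w => d.insert w p.1) d) d).get? e
      = match pvIdx? gs s e with
        | some i => some i
        | none => d.get? e := by
  induction gs generalizing s d with
  | nil => rfl
  | cons g rest ih =>
    simp only [List.flatten_cons, List.nodup_append] at hnd
    rw [PySem.List.enumerate_cons]
    simp only [List.foldl_cons, pvIdx?]
    rw [ih (s + 1) _ hnd.2.1, pvGroupFold_get?]
    by_cases hg : e ∈ g
    · have hro : e ∉ rest.flatten := fun hr => hnd.2.2 e hg e hr rfl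
      rw [pvIdx?_none_of_not_mem rest (s + 1) e hro]
      simp [hg]
    · simp [hg]

theorem pvLoopA_eq (gs : List (List String)) (s : Int) (e1 e2 : String)
    (hnd : gs.flatten.Nodup) :
    pvLoopA e1 e2 (gs.map PySem.Set.ofList)
      = match pvIdx? gs s e1 with
        | some i => if pvIdx? gs s e2 = some i then true else e1 == e2
        | none => e1 == e2 := by
  induction gs generalizing s with
  | nil => rfl
  | cons g rest ih =>
    simp only [List.flatten_cons, List.nodup_append] at hnd
    have hcon : ∀ x : String, PySem.Set.contains (PySem.Set.ofList g) x = decide (x ∈ g) := by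
      intro x
      by_cases hx : x ∈ g
      · rw [(PySem.Set.contains_iff _ x).2 ((PySem.Set.mem_ofList g x).2 hx)]; simp [hx]
      · have hne : PySem.Set.contains (PySem.Set.ofList g) x ≠ true :=
          fun hc => hx ((PySem.Set.mem_ofList g x).1 ((PySem.Set.contains_iff _ x).1 hc))
        rw [Bool.eq_false_iff.2 hne]; simp [hx]
    simp only [List.map_cons, pvLoopA, pvIdx?, hcon]
    by_cases h1 : e1 ∈ g <;> by_cases h2 : e2 ∈ g
    · simp [h1, h2]
    · have hro : e1 ∉ rest.flatten := fun hr => hnd.2.2 e1 h1 e1 hr rfl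
      have hn1 := pvIdx?_none_of_not_mem rest (s + 1) e1 hro
      have hne : pvIdx? rest (s + 1) e2 ≠ some s := fun hx => by
        have := pvIdx?_ge rest (s + 1) e2 s hx; omega
      simp [h1, h2, ih (s + 1) hnd.2.1, hn1, hne]
    · have hro : e2 ∉ rest.flatten := fun hr => hnd.2.2 e2 h2 e2 hr rfl
      have hn2 := pvIdx?_none_of_not_mem rest (s + 1) e2 hro
      have hne : ∀ i : Int, pvIdx? rest (s + 1) e1 = some i → some s ≠ some i := by
        intro i hx h
        have := pvIdx?_ge rest (s + 1) e1 i hx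
        simp only [Option.some.injEq] at h; omega
      rw [ih (s + 1) hnd.2.1]
      simp only [if_neg h1, if_pos h2, hn2]
      rcases hx1 : pvIdx? rest (s + 1) e1 with _ | i
      · simp [h1, h2]
      · simp [h1, h2, hne i hx1]
    · rw [if_neg (by simp [h1]), ih (s + 1) hnd.2.1]
      simp only [if_neg h1, if_neg h2]

theorem pvGroupsA_eq : pvGroupsA = pvGroupLists.map PySem.Set.ofList := by decide

theorem pvNodupWords : pvGroupLists.flatten.Nodup := by decide

-- the literal dict of B equals the enumerate/insert fold over the group lists (two concrete dicts)
set_option maxRecDepth 8192 in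
theorem pvGroupId_eq_fold :
    pvGroupId = (PySem.List.enumerate pvGroupLists 0).foldl
      (fun d p => p.2.foldl (fun d w => d.insert w p.1) d) PySem.Dict.empty := by decide

theorem pvGroupId_get? (e : String) :
    pvGroupId.get? e = pvIdx? pvGroupLists 0 e := by
  rw [pvGroupId_eq_fold,
      pvDictFold_get? pvGroupLists 0 PySem.Dict.empty e pvNodupWords]
  rcases h : pvIdx? pvGroupLists 0 e with _ | i <;> simp [PySem.Dict.get?_empty]

-- ===== VERDICT (by name: the statement is the Claim_ definition above) =====
theorem are_emotions_equivalent_spec : Claim_equal_are_emotions_equivalent := by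
  intro e1 e2 _
  unfold Spec_are_emotions_equivalent are_emotions_equivalent are_emotions_equivalent_alt
  rw [pvGroupsA_eq, pvLoopA_eq pvGroupLists 0 e1 e2 pvNodupWords,
      PySem.Dict.getD_eq_get?_getD, PySem.Dict.getD_eq_get?_getD,
      pvGroupId_get? e1, pvGroupId_get? e2]
  rcases h1 : pvIdx? pvGroupLists 0 e1 with _ | i <;>
    rcases h2 : pvIdx? pvGroupLists 0 e2 with _ | j
  · simp
  · have hj := pvIdx?_ge pvGroupLists 0 e2 j h2
    have : ((-1 : Int) == j) = false := by simp; omega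
    simp [this]
  · have hi := pvIdx?_ge pvGroupLists 0 e1 i h1
    have : ((i : Int) == -2) = false := by simp; omega
    simp [this]
  · simp only [Option.getD_some]
    by_cases hij : i = j
    · simp [hij]
    · have h1 : (some j ≠ some i) := by simp [Ne.symm hij]
      simp [hij, h1]
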